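-- pv_equiv track=rewrite | github.com/vasundhara7/InterviewBit-Practice | Arrays/HotelBookingsPossible.py | hotel
-- ===== SOURCE A (Python) =====
-- def hotel(arrive, depart, K):
--     li=[]
--     i=0
--     j=0
--     arrive.sort()
--     depart.sort()
--     while j<len(depart) and i<len(arrive):
--         if arrive[i]<depart[j]:
--             li.append(str(arrive[i])+'a')
--             i+=1
--         elif arrive[i]>=depart[j]:
--             li.append(str(depart[j])+'d')
--             j+=1
--     while i<len(arrive):
--         li.append(str(arrive[i])+'a')
--         i+=1
--     while j<len(depart):
--         li.append(str(depart[j])+'d')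
--         j+=1
--
--
--     count=0
--     for i in li:
--         if i[-1]=='a':
--             count+=1
--         else:
--             count-=1
--         if count>K:
--             return 0
--     return 1
-- ===== SOURCE B (Python) =====
-- def hotel(arrive, depart, K):
--     arrive.sort()
--     depart.sort()
--     events = [(t, 1) for t in arrive] + [(t, -1) for t in depart]
--     events.sort()
--     count = 0
--     for _, delta in events:
--         count += delta
--         if count > K:
--             return 0
--     return 1
-- ===== Notes on version B (the rewrite author's own statement) =====
-- stated objective: alternative
-- what changed: A merges the two sorted lists into tagged strings ('<t>a'/'<t>d') with a three-while-loop two-pointer merge and then scans the strings checking the last character; B builds one combined (time, delta) event list, sorts it once with tuple ordering (departures before arrivals at equal times), and sweeps the running count directly on the integer deltas, avoiding all per-event string construction and indexing.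
import Mathlib
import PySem

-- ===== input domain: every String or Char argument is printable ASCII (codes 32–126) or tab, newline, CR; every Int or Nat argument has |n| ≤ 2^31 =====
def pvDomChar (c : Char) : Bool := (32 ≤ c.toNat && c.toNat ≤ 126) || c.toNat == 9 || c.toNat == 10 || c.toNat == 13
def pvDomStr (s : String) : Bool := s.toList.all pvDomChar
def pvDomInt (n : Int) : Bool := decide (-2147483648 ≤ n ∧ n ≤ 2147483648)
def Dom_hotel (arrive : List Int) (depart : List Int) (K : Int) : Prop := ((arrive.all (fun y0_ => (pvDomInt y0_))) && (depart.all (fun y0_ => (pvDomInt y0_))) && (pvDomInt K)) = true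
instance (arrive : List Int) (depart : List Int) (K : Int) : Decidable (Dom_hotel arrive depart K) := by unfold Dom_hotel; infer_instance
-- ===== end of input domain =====

-- B replaces A's three-while-loop string merge + last-character scan by one combined (time, delta)
-- event list sorted with tuple order and an integer-delta sweep (objective: alternative).
-- Both A and B sort the argument lists in place in Python; the theorem is about the return value.


-- ===== PORT A =====
-- the while-loop merge over the two sorted lists (indices i, j become consuming the lists);
-- strings are ported as List Char (str(x)+'a' = PySem.Int.toChars x ++ ['a'], exact)
def hotelMergeA : List Int → List Int → List (List Char)
  | a :: as, d :: ds =>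
      if a < d then (PySem.Int.toChars a ++ ['a']) :: hotelMergeA as (d :: ds)
      else (PySem.Int.toChars d ++ ['d']) :: hotelMergeA (a :: as) ds
  | as, [] => as.map (fun a => PySem.Int.toChars a ++ ['a'])
  | [], ds => ds.map (fun d => PySem.Int.toChars d ++ ['d'])
  termination_by as ds => as.length + ds.length

-- the 'for i in li' loop with early return; i[-1] == 'a' is PySem.List.pyGet? s (-1) == some 'a'
def hotelSweepA : List (List Char) → Int → Int → Int
  | [], _, _ => 1
  | s :: rest, count, K =>
      let count' := if PySem.List.pyGet? s (-1) == some 'a' then count + 1 else count - 1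
      if count' > K then 0 else hotelSweepA rest count' K

def hotel (arrive : List Int) (depart : List Int) (K : Int) : Int :=
  let arriveS := PySem.List.sorted arrive (fun x => x) false
  let departS := PySem.List.sorted depart (fun x => x) false
  let li := hotelMergeA arriveS departS
  hotelSweepA li 0 K

-- ===== PORT B =====
-- 'for _, delta in events: count += delta; if count > K: return 0'
def hotelSweepB : List (Int × Int) → Int → Int → Int
  | [], _, _ => 1
  | (_, delta) :: rest, count, K =>
      let c := count + delta
      if c > K then 0 else hotelSweepB rest c K

def hotel_alt (arrive : List Int) (depart : List Int) (K : Int) : Int :=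
  let arriveS := PySem.List.sorted arrive (fun x => x) false
  let departS := PySem.List.sorted depart (fun x => x) false
  let events := arriveS.map (fun t => (t, (1 : Int))) ++ departS.map (fun t => (t, (-1 : Int)))
  let ev := PySem.List.sorted2 events Prod.fst Prod.snd false
  hotelSweepB ev 0 K

-- ===== PRECONDITION & SPEC =====
def Spec_hotel (arrive : List Int) (depart : List Int) (K : Int) (out : Int) : Prop := out = hotel_alt arrive depart K
instance (arrive : List Int) (depart : List Int) (K : Int) (out : Int) : Decidable (Spec_hotel arrive depart K out) := by unfold Spec_hotel; infer_instance

-- ===== CLAIM (what is proved, stated in full; the proofs are below) =====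
def Claim_equal_hotel : Prop := ∀ (arrive : List Int) (depart : List Int) (K : Int), Dom_hotel arrive depart K → Spec_hotel arrive depart K (hotel arrive depart K)

-- ===== LEMMAS AND PROOFS =====

-- proof-side merge of the two tagged event lists, same shape as hotelMergeA
def mergeE : List (Int × Int) → List (Int × Int) → List (Int × Int)
  | p :: ps, q :: qs =>
      if p.1 < q.1 then p :: mergeE ps (q :: qs)
      else q :: mergeE (p :: ps) qs
  | ps, [] => ps
  | [], qs => qs
  termination_by ps qs => ps.length + qs.length

theorem mergeE_perm : ∀ (ps qs : List (Int × Int)), (mergeE ps qs).Perm (ps ++ qs) := by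
  intro ps qs
  fun_induction mergeE ps qs with
  | case1 p ps q qs h ih => simpa using ih.cons p
  | case2 p ps q qs h ih => simpa using (ih.cons q).trans List.perm_middle.symm
  | case3 ps => simp
  | case4 qs => simp

theorem mem_mergeE {x : Int × Int} {ps qs : List (Int × Int)} :
    x ∈ mergeE ps qs ↔ x ∈ ps ∨ x ∈ qs := by
  rw [(mergeE_perm ps qs).mem_iff]; simp

theorem mergeE_pairwise : ∀ (ps qs : List (Int × Int)),
    (∀ p ∈ ps, p.2 = 1) → (∀ q ∈ qs, q.2 = -1) →
    ps.Pairwise (fun a b => a.1 ≤ b.1) → qs.Pairwise (fun a b => a.1 ≤ b.1) →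
    (mergeE ps qs).Pairwise (fun a b => toLex a ≤ toLex b) := by
  intro ps qs
  fun_induction mergeE ps qs with
  | case1 p ps q qs h ih =>
      intro h1 h2 hp hq
      refine List.pairwise_cons.mpr ⟨?_, ih (fun r hr => h1 r (by simp [hr]))
        h2 (List.pairwise_cons.mp hp).2 hq⟩
      intro b hb
      refine Prod.Lex.toLex_le_toLex.mpr ?_
      rcases mem_mergeE.mp hb with hb | hb
      · have hle : p.1 ≤ b.1 := (List.pairwise_cons.mp hp).1 b hb
        have e1 : p.2 = 1 := h1 p (by simp)
        have e2 : b.2 = 1 := h1 b (by simp [hb])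
        rcases lt_or_eq_of_le hle with hlt | heq
        · exact Or.inl hlt
        · exact Or.inr ⟨heq, by omega⟩
      · rcases List.mem_cons.mp hb with rfl | hb
        · exact Or.inl h
        · have : q.1 ≤ b.1 := (List.pairwise_cons.mp hq).1 b hb
          exact Or.inl (lt_of_lt_of_le h this)
  | case2 p ps q qs h ih =>
      intro h1 h2 hp hq
      refine List.pairwise_cons.mpr ⟨?_, ih h1 (fun r hr => h2 r (by simp [hr]))
        hp (List.pairwise_cons.mp hq).2⟩
      intro b hb
      refine Prod.Lex.toLex_le_toLex.mpr ?_
      have eq2 : q.2 = -1 := h2 q (by simp)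
      rcases mem_mergeE.mp hb with hb | hb
      · have eb : b.2 = 1 := h1 b hb
        have hqb : q.1 ≤ b.1 := by
          rcases List.mem_cons.mp hb with rfl | hb
          · omega
          · have : p.1 ≤ b.1 := (List.pairwise_cons.mp hp).1 b hb
            omega
        rcases lt_or_eq_of_le hqb with hlt | heq
        · exact Or.inl hlt
        · exact Or.inr ⟨heq, by omega⟩
      · have hqb : q.1 ≤ b.1 := (List.pairwise_cons.mp hq).1 b hb
        have eb : b.2 = -1 := h2 b (by simp [hb])
        rcases lt_or_eq_of_le hqb with hlt | heq
        · exact Or.inl hlt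
        · exact Or.inr ⟨heq, by omega⟩
  | case3 ps =>
      intro h1 _ hp _
      refine List.Pairwise.imp_of_mem ?_ hp
      intro a b ha hb hab
      have e1 := h1 a ha
      have e2 := h1 b hb
      refine Prod.Lex.toLex_le_toLex.mpr ?_
      rcases lt_or_eq_of_le hab with hlt | heq
      · exact Or.inl hlt
      · exact Or.inr ⟨heq, by omega⟩
  | case4 qs =>
      intro _ h2 _ hq
      refine List.Pairwise.imp_of_mem ?_ hq
      intro a b ha hb hab
      have e1 := h2 a ha
      have e2 := h2 b hb
      refine Prod.Lex.toLex_le_toLex.mpr ?_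
      rcases lt_or_eq_of_le hab with hlt | heq
      · exact Or.inl hlt
      · exact Or.inr ⟨heq, by omega⟩

-- sorted2 with fst/snd keys is sorted with the lexicographic key
theorem sorted2_eq_sorted_lex (xs : List (Int × Int)) :
    PySem.List.sorted2 xs Prod.fst Prod.snd false
      = PySem.List.sorted xs (fun p => toLex p) false := by
  show xs.foldl (fun acc x => PySem.List.insertBy _ x acc) []
      = xs.foldl (fun acc x => PySem.List.insertBy _ x acc) []
  have hbefore : (fun (a b : Int × Int) =>
        decide (a.1 < b.1) || (!decide (b.1 < a.1) && decide (a.2 < b.2)))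
      = fun (a b : Int × Int) => decide (toLex a < toLex b) := by
    funext a b
    have hiff : (toLex a < toLex b) ↔ (a.1 < b.1 ∨ a.1 = b.1 ∧ a.2 < b.2) :=
      Prod.Lex.toLex_lt_toLex
    by_cases h1 : a.1 < b.1 <;> by_cases h2 : b.1 < a.1 <;> by_cases h3 : a.2 < b.2 <;>
      simp [h1, h2, h3, hiff] <;> omega
  rw [hbefore]

theorem sortedE_eq_mergeE (a d : List Int) :
    PySem.List.sorted2
      ((PySem.List.sorted a (fun x => x) false).map (fun t => (t, (1 : Int)))
        ++ (PySem.List.sorted d (fun x => x) false).map (fun t => (t, (-1 : Int))))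
      Prod.fst Prod.snd false
    = mergeE ((PySem.List.sorted a (fun x => x) false).map (fun t => (t, (1 : Int))))
             ((PySem.List.sorted d (fun x => x) false).map (fun t => (t, (-1 : Int)))) := by
  set A := (PySem.List.sorted a (fun x => x) false).map (fun t => (t, (1 : Int))) with hA
  set D := (PySem.List.sorted d (fun x => x) false).map (fun t => (t, (-1 : Int))) with hD
  rw [sorted2_eq_sorted_lex]
  refine PySem.List.eq_of_perm_of_pairwise_le_of_injective (fun p => toLex p)
    (fun x y h => by simpa using h) ?_ ?_ ?_
  · exact (PySem.List.sorted_perm (A ++ D) (fun p => toLex p) false).trans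
      (mergeE_perm A D).symm
  · exact PySem.List.sorted_pairwise (A ++ D) (fun p => toLex p)
  · refine mergeE_pairwise A D ?_ ?_ ?_ ?_
    · intro p hp; rw [hA] at hp; simp at hp; obtain ⟨t, _, rfl⟩ := hp; rfl
    · intro q hq; rw [hD] at hq; simp at hq; obtain ⟨t, _, rfl⟩ := hq; rfl
    · rw [hA]
      refine List.pairwise_map.mpr ?_
      exact (PySem.List.sorted_pairwise a (fun x => x)).imp (fun h => h)
    · rw [hD]
      refine List.pairwise_map.mpr ?_
      exact (PySem.List.sorted_pairwise d (fun x => x)).imp (fun h => h)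

-- A's merged string list is the image of the event merge
def strOf (p : Int × Int) : List Char :=
  PySem.Int.toChars p.1 ++ [if p.2 == 1 then 'a' else 'd']

theorem mergeA_eq_map (a d : List Int) :
    hotelMergeA a d
      = (mergeE (a.map (fun t => (t, (1 : Int)))) (d.map (fun t => (t, (-1 : Int))))).map strOf := by
  fun_induction hotelMergeA a d with
  | case1 x as y ds h ih =>
      simp only [List.map_cons]
      rw [show (mergeE ((x, (1:Int)) :: as.map (fun t => (t, (1:Int)))) ((y, (-1:Int)) :: ds.map (fun t => (t, (-1:Int)))))
            = (x, (1:Int)) :: mergeE (as.map (fun t => (t, (1:Int)))) ((y, (-1:Int)) :: ds.map (fun t => (t, (-1:Int)))) from by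
          simp only [mergeE]; rw [if_pos h]]
      simp only [List.map_cons, strOf, ih]
      simp
  | case2 x as y ds h ih =>
      simp only [List.map_cons]
      rw [show (mergeE ((x, (1:Int)) :: as.map (fun t => (t, (1:Int)))) ((y, (-1:Int)) :: ds.map (fun t => (t, (-1:Int)))))
            = (y, (-1:Int)) :: mergeE ((x, (1:Int)) :: as.map (fun t => (t, (1:Int)))) (ds.map (fun t => (t, (-1:Int)))) from by
          simp only [mergeE]; rw [if_neg h]]
      simp only [List.map_cons, strOf, ih]
      simp
  | case3 as =>
      have h0 : mergeE (as.map (fun t => (t, (1:Int)))) [] = as.map (fun t => (t, (1:Int))) := by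
        cases as <;> simp [mergeE]
      simp only [List.map_nil, h0, List.map_map]
      simp [strOf, Function.comp]
  | case4 ds =>
      have h0 : mergeE [] (ds.map (fun t => (t, (-1:Int)))) = ds.map (fun t => (t, (-1:Int))) := by
        cases ds <;> simp [mergeE]
      simp only [List.map_nil, h0, List.map_map]
      simp [strOf, Function.comp]

theorem sweepA_eq_sweepB : ∀ (M : List (Int × Int)) (c K : Int),
    (∀ p ∈ M, p.2 = 1 ∨ p.2 = -1) →
    hotelSweepA (M.map strOf) c K = hotelSweepB M c K := by
  intro M
  induction M with
  | nil => intro c K _; rfl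
  | cons p M ih =>
      intro c K h
      obtain ⟨t, δ⟩ := p
      have hrest : ∀ q ∈ M, q.2 = 1 ∨ q.2 = -1 := fun q hq => h q (by simp [hq])
      rcases h (t, δ) (by simp) with h1 | h1 <;> subst h1
      · simp only [List.map_cons, hotelSweepA, hotelSweepB, strOf,
          PySem.List.pyGet?_neg_one_append_singleton]
        rw [show ((1 : Int) == 1) = true from by decide]
        simp only [if_true]
        rw [show ((some 'a' : Option Char) == some 'a') = true from by decide]
        simp only [if_true]
        split
        · rfl
        · exact ih (c + 1) K hrest
      · simp only [List.map_cons, hotelSweepA, hotelSweepB, strOf,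
          PySem.List.pyGet?_neg_one_append_singleton]
        rw [show ((-1 : Int) == 1) = false from by decide]
        simp only [Bool.false_eq_true, if_false]
        rw [show ((some 'd' : Option Char) == some 'a') = false from by decide]
        simp only [Bool.false_eq_true, if_false]
        rw [show c - 1 = c + -1 from by omega]
        split
        · rfl
        · exact ih (c + -1) K hrest

-- ===== VERDICT (by name: the statement is the Claim_ definition above) =====
theorem hotel_spec : Claim_equal_hotel := by
  intro arrive depart K _
  unfold Spec_hotel hotel hotel_alt
  dsimp only
  rw [sortedE_eq_mergeE, mergeA_eq_map]
  refine sweepA_eq_sweepB _ 0 K ?_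
  intro p hp
  rcases mem_mergeE.mp hp with hp | hp <;> simp at hp <;> obtain ⟨t, _, rfl⟩ := hp
  · left; rfl
  · right; rfl
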